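-- pv_equiv track=rewrite | github.com/manyleadsnow-sys/oe-dashboard | calculator.py | dedup_by_end
-- ===== SOURCE A (Python) =====
-- def dedup_by_end(entries, form_types=("10-Q", "10-K")):
--     filtered = [e for e in entries if e.get("form", "") in form_types]
--     seen = {}
--     for e in filtered:
--         key = e["end"]
--         if key not in seen or e.get("filed", "") > seen[key].get("filed", ""):
--             seen[key] = e
--     return sorted(seen.values(), key=lambda x: x["end"], reverse=True)
-- ===== SOURCE B (Python) =====
-- def dedup_by_end(entries, form_types=("10-Q", "10-K")):
--     filtered = [e for e in entries if e.get("form", "") in form_types]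
--     ends = sorted({e["end"] for e in filtered}, reverse=True)
--     return [max((e for e in filtered if e["end"] == k),
--                 key=lambda e: e.get("filed", ""))
--             for k in ends]
-- ===== Notes on version B (the rewrite author's own statement) =====
-- stated objective: alternative
-- what changed: Replaces A's incremental best-so-far dict plus final sort of its values with a declarative pipeline: collect the distinct 'end' values as a set, sort them descending, and for each end pick the representative directly with max(..., key=filed) over the entries sharing that end.
import Mathlib
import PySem

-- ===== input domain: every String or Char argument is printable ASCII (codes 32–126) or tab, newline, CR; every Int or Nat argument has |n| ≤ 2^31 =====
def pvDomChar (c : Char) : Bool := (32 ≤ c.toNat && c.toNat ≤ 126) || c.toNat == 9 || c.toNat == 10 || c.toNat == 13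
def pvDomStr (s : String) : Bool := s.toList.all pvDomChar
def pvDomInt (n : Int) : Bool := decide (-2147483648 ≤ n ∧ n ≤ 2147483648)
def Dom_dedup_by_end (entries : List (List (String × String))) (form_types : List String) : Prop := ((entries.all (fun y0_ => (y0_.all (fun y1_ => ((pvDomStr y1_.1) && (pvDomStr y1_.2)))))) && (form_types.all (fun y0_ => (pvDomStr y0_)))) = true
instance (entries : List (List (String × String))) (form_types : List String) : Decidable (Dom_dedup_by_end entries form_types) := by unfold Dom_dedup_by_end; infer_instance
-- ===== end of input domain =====

-- ===== PORT A =====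
-- B replaces A's incremental best-so-far dict with sort-distinct-ends + per-end max (alternative decomposition, same values).
-- shared Python-dict primitives: e.get(k, dflt) and e[k] (the latter total here; Pre_ excludes the KeyError inputs)
def pvGetD (e : List (String × String)) (k dflt : String) : String := (PySem.Dict.mk e).getD k dflt
def pvGet (e : List (String × String)) (k : String) : String := ((PySem.Dict.mk e).get? k).getD ""

def dedup_by_end (entries : List (List (String × String))) (form_types : List String) : List (List (String × String)) :=
  let filtered := entries.filter (fun e => form_types.contains (pvGetD e "form" ""))
  let seen := filtered.foldl
    (fun (seen : PySem.Dict String (List (String × String))) e =>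
      let key := pvGet e "end"
      if !seen.contains key || decide (pvGetD (seen.getD key []) "filed" "" < pvGetD e "filed" "") then
        seen.insert key e
      else seen)
    PySem.Dict.empty
  PySem.List.sorted seen.values (fun x => pvGet x "end") true

-- ===== PORT B =====
def dedup_by_end_alt (entries : List (List (String × String))) (form_types : List String) : List (List (String × String)) :=
  let filtered := entries.filter (fun e => form_types.contains (pvGetD e "form" ""))
  let ends := PySem.List.sorted (PySem.Set.ofList (filtered.map (fun e => pvGet e "end"))) (fun k => k) true
  ends.map (fun k =>
    (PySem.List.max? (filtered.filter (fun e => pvGet e "end" == k)) (fun e => pvGetD e "filed" "")).getD [])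

-- ===== PRECONDITION & SPEC =====
-- Pre_ excludes exactly the inputs where Python raises KeyError: an entry passing the form filter without an "end" key.
def Pre_dedup_by_end (entries : List (List (String × String))) (form_types : List String) : Prop :=
  ∀ e ∈ entries, form_types.contains (pvGetD e "form" "") = true → (PySem.Dict.mk e).contains "end" = true
instance (entries : List (List (String × String))) (form_types : List String) : Decidable (Pre_dedup_by_end entries form_types) := by unfold Pre_dedup_by_end; infer_instance
def pvWitness_dedup_by_end : (List (List (String × String))) × List String :=
  ([[("form", "10-Q"), ("end", "2024-01-01"), ("filed", "2024-02-01")],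
    [("form", "10-K"), ("end", "2024-01-01"), ("filed", "2024-03-01")],
    [("form", "8-K"), ("x", "y")]], ["10-Q", "10-K"])

def Spec_dedup_by_end (entries : List (List (String × String))) (form_types : List String) (out : List (List (String × String))) : Prop := out = dedup_by_end_alt entries form_types
instance (entries : List (List (String × String))) (form_types : List String) (out : List (List (String × String))) : Decidable (Spec_dedup_by_end entries form_types out) := by unfold Spec_dedup_by_end; infer_instance

-- ===== CLAIM (what is proved, stated in full; the proofs are below) =====
def Claim_equal_dedup_by_end : Prop := ∀ (entries : List (List (String × String))) (form_types : List String), Dom_dedup_by_end entries form_types → Pre_dedup_by_end entries form_types → Spec_dedup_by_end entries form_types (dedup_by_end entries form_types)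

-- ===== LEMMAS AND PROOFS =====

-- abbreviations for the proofs (the two lookups and A's loop body)
def pvEkey (e : List (String × String)) : String := pvGet e "end"
def pvFkey (e : List (String × String)) : String := pvGetD e "filed" ""
def pvStep (seen : PySem.Dict String (List (String × String))) (e : List (String × String)) :
    PySem.Dict String (List (String × String)) :=
  if !seen.contains (pvEkey e) || decide (pvGetD (seen.getD (pvEkey e) []) "filed" "" < pvFkey e) then
    seen.insert (pvEkey e) e
  else seen
def pvMStep (acc : Option (List (String × String))) (e : List (String × String)) :
    Option (List (String × String)) :=
  match acc with
  | none => some e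
  | some m => if pvFkey m < pvFkey e then some e else some m

theorem pvStep_get? (d : PySem.Dict String (List (String × String))) (e : List (String × String)) (k : String) :
    (pvStep d e).get? k = if pvEkey e = k then pvMStep (d.get? k) e else d.get? k := by
  unfold pvStep pvMStep
  by_cases hk : pvEkey e = k
  · subst hk
    rw [if_pos rfl]
    cases hg : d.get? (pvEkey e) with
    | none =>
      have hc : d.contains (pvEkey e) = false := by
        rw [PySem.Dict.contains_eq_isSome_get?, hg]; rfl
      rw [hc]
      simp only [Bool.not_false, Bool.true_or, if_true]
      rw [PySem.Dict.get?_insert_self]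
    | some b =>
      have hc : d.contains (pvEkey e) = true := by
        rw [PySem.Dict.contains_eq_isSome_get?, hg]; rfl
      have hb : d.getD (pvEkey e) [] = b := PySem.Dict.getD_of_get?_eq_some d [] hg
      rw [hc, hb]
      simp only [Bool.not_true, Bool.false_or, pvFkey, decide_eq_true_eq]
      by_cases hlt : pvGetD b "filed" "" < pvGetD e "filed" ""
      · rw [if_pos hlt, PySem.Dict.get?_insert_self, if_pos hlt]
      · rw [if_neg hlt, hg, if_neg hlt]
  · rw [if_neg hk]
    split
    · exact PySem.Dict.get?_insert_of_ne d e (fun h => hk h.symm)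
    · rfl

theorem pvFold_get? (l : List (List (String × String))) (d : PySem.Dict String (List (String × String))) (k : String) :
    (l.foldl pvStep d).get? k = (l.filter (fun e => pvEkey e == k)).foldl pvMStep (d.get? k) := by
  induction l generalizing d with
  | nil => rfl
  | cons e t ih =>
    rw [List.foldl_cons, ih, List.filter_cons]
    by_cases hk : pvEkey e = k
    · simp [hk, pvStep_get? d e k]
    · simp [hk, pvStep_get? d e k]

theorem pvFold_keys (l : List (List (String × String))) (d : PySem.Dict String (List (String × String))) :
    (l.foldl pvStep d).keys = PySem.Set.update d.keys (l.map pvEkey) := by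
  induction l generalizing d with
  | nil => rfl
  | cons e t ih =>
    rw [List.foldl_cons, ih, List.map_cons]
    have hkeys : (pvStep d e).keys = PySem.Set.add d.keys (pvEkey e) := by
      unfold pvStep PySem.Set.add
      have hc : PySem.Set.contains d.keys (pvEkey e) = d.contains (pvEkey e) := by
        rw [PySem.Dict.contains_eq_decide_mem_keys]
        simp [PySem.Set.contains]
      cases hcon : d.contains (pvEkey e) with
      | true =>
        rw [hc, hcon, if_pos rfl]
        split
        · exact PySem.Dict.keys_insert_of_contains d e hcon
        · rfl
      | false =>
        rw [hc, hcon, if_neg Bool.false_ne_true]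
        simp only [Bool.not_false, Bool.true_or]
        rw [if_pos trivial]
        exact PySem.Dict.keys_insert_of_not_contains d e hcon
    rw [hkeys]
    rfl

theorem pvMax_ekey (filtered : List (List (String × String))) (k : String)
    (hk : k ∈ PySem.Set.ofList (filtered.map pvEkey)) :
    pvEkey ((PySem.List.max? (filtered.filter (fun e => pvEkey e == k)) pvFkey).getD []) = k := by
  rw [PySem.Set.mem_ofList] at hk
  obtain ⟨e, he, hke⟩ := List.mem_map.mp hk
  have hne : filtered.filter (fun e => pvEkey e == k) ≠ [] := by
    intro h0
    have : e ∈ filtered.filter (fun e => pvEkey e == k) := by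
      rw [List.mem_filter]; exact ⟨he, by simp [hke]⟩
    rw [h0] at this; exact absurd this (List.not_mem_nil)
  cases hm : PySem.List.max? (filtered.filter (fun e => pvEkey e == k)) pvFkey with
  | none => exact absurd ((PySem.List.max?_eq_none_iff _ _).mp hm) hne
  | some m =>
    have := PySem.List.max?_mem hm
    rw [List.mem_filter] at this
    simpa using this.2

-- ===== VERDICT (by name: the statement is the Claim_ definition above) =====
theorem dedup_by_end_spec : Claim_equal_dedup_by_end := by
  intro entries form_types _ _
  unfold Spec_dedup_by_end
  set filtered := entries.filter (fun e => form_types.contains (pvGetD e "form" "")) with hf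
  have hA : dedup_by_end entries form_types =
      PySem.List.sorted (filtered.foldl pvStep PySem.Dict.empty).values (fun x => pvGet x "end") true := rfl
  have hB : dedup_by_end_alt entries form_types =
      (PySem.List.sorted (PySem.Set.ofList (filtered.map pvEkey)) (fun k => k) true).map
        (fun k => (PySem.List.max? (filtered.filter (fun e => pvEkey e == k)) pvFkey).getD []) := rfl
  rw [hA, hB]
  set seen := filtered.foldl pvStep PySem.Dict.empty with hs
  have hkeys : seen.keys = PySem.Set.ofList (filtered.map pvEkey) := by
    rw [hs, pvFold_keys]
    simp [PySem.Dict.keys_empty, PySem.Set.update, PySem.Set.ofList, PySem.Set.empty]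
  have hnd : seen.keys.Nodup := by rw [hkeys]; exact PySem.Set.nodup_ofList _
  have hget : ∀ k, seen.get? k =
      PySem.List.max? (filtered.filter (fun e => pvEkey e == k)) pvFkey := by
    intro k
    rw [hs, pvFold_get?, PySem.Dict.get?_empty]
    unfold PySem.List.max?
    exact PySem.List.foldl_congr_mem _ _ _ _ (fun acc x _ => by cases acc <;> rfl)
  have hvals : seen.values = seen.keys.map
      (fun k => (PySem.List.max? (filtered.filter (fun e => pvEkey e == k)) pvFkey).getD []) := by
    rw [PySem.Dict.values_eq_map_keys seen hnd []]
    exact List.map_congr_left (fun k _ => by rw [PySem.Dict.getD_eq_get?_getD, hget k])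
  have hmain : PySem.List.sorted seen.values (fun x => pvGet x "end") true =
      (PySem.List.sorted seen.keys (fun k => k) true).map
        (fun k => (PySem.List.max? (filtered.filter (fun e => pvEkey e == k)) pvFkey).getD []) := by
    apply PySem.List.sorted_rev_eq_of_perm_of_pairwise_gt
    · rw [hvals]
      exact ((PySem.List.sorted_perm seen.keys (fun k => k) true).map _)
    · have hsn : (PySem.List.sorted seen.keys (fun k => k) true).Nodup :=
        hnd.perm (PySem.List.sorted_perm seen.keys (fun k => k) true).symm
      have hpw := (PySem.List.sorted_pairwise_rev seen.keys (fun k => k)).and hsn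
      rw [List.pairwise_map]
      refine hpw.imp_of_mem ?_
      intro a b ha hb hab
      have hmem : ∀ x, x ∈ PySem.List.sorted seen.keys (fun k => k) true → x ∈ PySem.Set.ofList (filtered.map pvEkey) := by
        intro x hx
        rw [← hkeys]
        exact (PySem.List.sorted_perm seen.keys (fun k => k) true).mem_iff.mp hx
      have hea := pvMax_ekey filtered a (hmem a ha)
      have heb := pvMax_ekey filtered b (hmem b hb)
      show pvEkey _ < pvEkey _
      rw [hea, heb]
      exact lt_of_le_of_ne hab.1 (fun h => hab.2 h.symm)
  rw [← hkeys]
  exact hmain
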